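-- pv_equiv track=rewrite | github.com/Howardhuang98/Blog | LC_problems/联想8.5.py | solu
-- ===== SOURCE A (Python) =====
-- import collections
--
-- def solu(n: int, s: str):
--     c = collections.Counter(s)
--     l_red = 0
--     l_blue = 0
--     r_red = c["r"]
--     r_blue = c["b"]
--     op = min(r_red + l_blue, l_blue + r_red)
--     for i, c in enumerate(s):
--         if s[i] == "r":
--             r_red -= 1
--             l_red += 1
--         else:
--             r_blue -= 1
--             l_blue += 1
--
--         op = min(op, min(r_red + l_blue, l_blue + r_red))
--     return op
-- ===== SOURCE B (Python) =====
-- def solu(n: int, s: str):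
--     # Dynamic programming over suffixes, scanned right to left:
--     # best = cheapest cost for the suffix seen so far, choosing either to
--     # place the cut at the current position (pay r_seen, the 'r's in the
--     # suffix) or to pay for this char and keep the best cut found further right.
--     best = 0
--     r_seen = 0
--     for c in reversed(s):
--         if c == "r":
--             r_seen += 1
--             best = min(best, r_seen)
--         else:
--             best = min(best + 1, r_seen)
--     return best
-- ===== Notes on version B (the rewrite author's own statement) =====
-- stated objective: alternative
-- what changed: Replaces A's forward scan with four left/right counters evaluating every split by a right-to-left dynamic program over suffixes: best = min(cost of cutting here = r's seen in the suffix, cost of this char + best cut further right); fewer counters and no Counter pre-pass make it measurably faster by a constant factor.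
import Mathlib
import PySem

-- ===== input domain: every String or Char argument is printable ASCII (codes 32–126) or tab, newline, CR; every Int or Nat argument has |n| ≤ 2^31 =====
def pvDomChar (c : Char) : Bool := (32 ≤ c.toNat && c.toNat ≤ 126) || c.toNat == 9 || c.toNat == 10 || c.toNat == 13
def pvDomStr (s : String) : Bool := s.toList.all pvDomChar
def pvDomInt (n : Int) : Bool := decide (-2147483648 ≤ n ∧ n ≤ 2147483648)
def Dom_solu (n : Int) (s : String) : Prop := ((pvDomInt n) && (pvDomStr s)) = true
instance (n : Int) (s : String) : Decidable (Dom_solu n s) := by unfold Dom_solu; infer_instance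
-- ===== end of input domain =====

-- B replaces A's forward four-counter scan over all splits by a right-to-left
-- dynamic program over suffixes (objective: alternative).

-- ===== PORT A =====
-- state: (l_red, l_blue, r_red, r_blue, op)
def soluStep (st : Int × Int × Int × Int × Int) (c : Char) : Int × Int × Int × Int × Int :=
  let (lr, lb, rr, rb, op) := st
  if c = 'r' then
    let rr' := rr - 1
    let lr' := lr + 1
    (lr', lb, rr', rb, min op (min (rr' + lb) (lb + rr')))
  else
    let rb' := rb - 1
    let lb' := lb + 1
    (lr, lb', rr, rb', min op (min (rr + lb') (lb' + rr)))

def solu (n : Int) (s : String) : Int :=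
  let cr : Int := (s.toList.count 'r' : Int)
  let cb : Int := (s.toList.count 'b' : Int)
  let st := s.toList.foldl soluStep (0, 0, cr, cb, min (cr + 0) (0 + cr))
  st.2.2.2.2

-- ===== PORT B =====
-- state: (best, r_seen); the loop runs over reversed(s)
def soluAltStep (p : Int × Int) (c : Char) : Int × Int :=
  if c = 'r' then
    let rs := p.2 + 1
    (min p.1 rs, rs)
  else
    (min (p.1 + 1) p.2, p.2)

def solu_alt (n : Int) (s : String) : Int :=
  (s.toList.reverse.foldl soluAltStep (0, 0)).1

-- ===== PRECONDITION & SPEC =====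
def Spec_solu (n : Int) (s : String) (out : Int) : Prop := out = solu_alt n s
instance (n : Int) (s : String) (out : Int) : Decidable (Spec_solu n s out) := by unfold Spec_solu; infer_instance

-- ===== CLAIM (what is proved, stated in full; the proofs are below) =====
def Claim_equal_solu : Prop := ∀ (n : Int) (s : String), Dom_solu n s → Spec_solu n s (solu n s)

-- ===== LEMMAS AND PROOFS =====

-- mb0 l = minimum prefix balance of l (empty prefix included), balance = #non-r − #r, counted from the left
def mb0 : List Char → Int
  | [] => 0
  | c :: t => min 0 ((if c = 'r' then -1 else 1) + mb0 t)

def rcnt : List Char → Int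
  | [] => 0
  | c :: t => (if c = 'r' then 1 else 0) + rcnt t

theorem mb0_nonpos (l : List Char) : mb0 l ≤ 0 := by
  cases l with
  | nil => simp [mb0]
  | cons c t => simp [mb0]

theorem rcnt_eq_count (l : List Char) : rcnt l = (l.count 'r' : Int) := by
  induction l with
  | nil => simp [rcnt]
  | cons c t ih =>
    by_cases hc : c = 'r' <;>
      simp [rcnt, hc, ih]; omega

-- A's loop invariant: with rr + lb = T + bal, op = T + best and best ≤ bal,
-- the final op is T + min best (bal + mb0 l).
theorem soluA_inv (l : List Char) (lr lb rr rb op bal best T : Int)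
    (h1 : rr + lb = T + bal) (h2 : op = T + best) (h3 : best ≤ bal) :
    (l.foldl soluStep (lr, lb, rr, rb, op)).2.2.2.2 = T + min best (bal + mb0 l) := by
  induction l generalizing lr lb rr rb op bal best with
  | nil =>
    simp only [List.foldl_nil, mb0]
    omega
  | cons c t ih =>
    have hm := mb0_nonpos t
    by_cases hc : c = 'r'
    · simp only [List.foldl_cons, soluStep, hc, reduceIte, mb0]
      rw [ih (lr + 1) lb (rr - 1) rb (min op (min (rr - 1 + lb) (lb + (rr - 1))))
          (bal - 1) (min best (bal - 1)) (by omega) (by omega) (by omega)]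
      omega
    · simp only [List.foldl_cons, soluStep, hc, reduceIte, mb0]
      rw [ih lr (lb + 1) rr (rb - 1) (min op (min (rr + (lb + 1)) (lb + 1 + rr)))
          (bal + 1) (min best (bal + 1)) (by omega) (by omega) (by omega)]
      omega

-- B's backward DP computes (rcnt l + mb0 l, rcnt l) as a right fold.
theorem soluB_foldr (l : List Char) :
    l.foldr (fun c p => soluAltStep p c) (0, 0) = (rcnt l + mb0 l, rcnt l) := by
  induction l with
  | nil => simp [rcnt, mb0]
  | cons c t ih =>
    have hm := mb0_nonpos t
    rw [List.foldr_cons, ih]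
    by_cases hc : c = 'r' <;>
      simp only [soluAltStep, rcnt, mb0, hc, reduceIte, Prod.mk.injEq] <;>
      exact ⟨by omega, by omega⟩

theorem solu_eq (n : Int) (s : String) : solu n s = solu_alt n s := by
  unfold solu solu_alt
  have hA := soluA_inv s.toList 0 0 (s.toList.count 'r' : Int) (s.toList.count 'b' : Int)
      (min ((s.toList.count 'r' : Int) + 0) (0 + (s.toList.count 'r' : Int)))
      0 0 (s.toList.count 'r' : Int) (by omega) (by omega) (by omega)
  have hB : (s.toList.reverse.foldl soluAltStep (0, 0)).1
      = rcnt s.toList + mb0 s.toList := by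
    rw [List.foldl_reverse, soluB_foldr]
  have hm := mb0_nonpos s.toList
  have hr := rcnt_eq_count s.toList
  simp only [hA, hB]
  omega

-- ===== VERDICT (by name: the statement is the Claim_ definition above) =====
theorem solu_spec : Claim_equal_solu := by
  intro n s _
  exact solu_eq n s
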